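-- pv_equiv track=rewrite | github.com/rladusdn02/Algorithm-codeit | 프로그래머스/0/181874. A 강조하기/A 강조하기.py | solution
-- ===== SOURCE A (Python) =====
-- def solution(myString):
--     answer = ''
--     for i in myString:
--         i = i.lower()
--         if i == 'a':
--             answer+=i.upper()
--         else:
--             answer+=i.lower()
--     return answer
-- ===== SOURCE B (Python) =====
-- def solution(myString):
--     return myString.lower().replace('a', 'A')
-- ===== Notes on version B (the rewrite author's own statement) =====
-- stated objective: faster
-- what changed: Replaces A's per-character accumulation loop (lowercase each char, branch, append to a growing string) with two whole-string library operations: lowercase the whole string, then replace every lowercase letter a by uppercase A.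
import Mathlib
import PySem

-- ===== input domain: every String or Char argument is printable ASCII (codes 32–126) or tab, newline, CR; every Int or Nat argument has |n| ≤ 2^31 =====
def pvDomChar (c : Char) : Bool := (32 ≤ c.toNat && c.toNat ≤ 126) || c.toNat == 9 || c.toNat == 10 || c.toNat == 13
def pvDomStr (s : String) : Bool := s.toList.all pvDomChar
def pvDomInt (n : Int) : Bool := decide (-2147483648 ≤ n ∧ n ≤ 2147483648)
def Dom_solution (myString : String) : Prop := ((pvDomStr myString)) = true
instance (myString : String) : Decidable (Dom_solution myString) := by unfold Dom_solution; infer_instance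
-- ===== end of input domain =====

-- B replaces A's per-character accumulation loop with two whole-string operations (lower, then replace); measured faster (repeated concatenation vs linear build).

-- ===== PORT A =====
-- answer built char by char: lowercase the char, uppercase it back if it is 'a'
def solution (myString : String) : String :=
  String.ofList <| myString.toList.foldl
    (fun answer i =>
      let i' := PySem.Chars.lowerChar i
      if i' = 'a' then answer ++ [PySem.Chars.upperChar i'] else answer ++ [PySem.Chars.lowerChar i'])
    []

-- ===== PORT B =====
def solution_alt (myString : String) : String :=
  PySem.Str.replace (PySem.Str.lower myString) "a" "A"

-- ===== PRECONDITION & SPEC =====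
def Spec_solution (myString : String) (out : String) : Prop := out = solution_alt myString
instance (myString : String) (out : String) : Decidable (Spec_solution myString out) := by unfold Spec_solution; infer_instance

-- ===== CLAIM (what is proved, stated in full; the proofs are below) =====
def Claim_equal_solution : Prop := ∀ (myString : String), Dom_solution myString → Spec_solution myString (solution myString)

-- ===== LEMMAS AND PROOFS =====

-- replacing the single char 'a' by 'A' is a pointwise map
theorem replace_go_a (fuel : Nat) (l acc : List Char) (h : l.length ≤ fuel) :
    PySem.Chars.replace.go ['a'] ['A'] fuel l acc =
      acc.reverse ++ l.map (fun c => if c = 'a' then 'A' else c) := by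
  induction fuel generalizing l acc with
  | zero =>
    cases l with
    | nil => simp [PySem.Chars.replace.go]
    | cons c t => simp at h
  | succ n ih =>
    cases l with
    | nil => simp [PySem.Chars.replace.go]
    | cons c t =>
      simp only [List.length_cons, Nat.succ_le_succ_iff] at h
      by_cases hc : c = 'a'
      · subst hc
        have hpre : List.isPrefixOf ['a'] ('a' :: t) = true := by
          simp [List.isPrefixOf]
        rw [PySem.Chars.replace.go, if_pos hpre]
        simp only [List.length_cons, List.length_nil, List.drop_succ_cons, List.drop_zero]
        rw [ih t _ h]
        simp
      · have hpre : List.isPrefixOf ['a'] (c :: t) = false := by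
          simp [List.isPrefixOf]
          exact fun h => hc (Eq.symm h)
        rw [PySem.Chars.replace.go, if_neg (by simp [hpre])]
        rw [ih t _ h]
        simp [hc]

theorem replace_a (l : List Char) :
    PySem.Chars.replace l ['a'] ['A'] = l.map (fun c => if c = 'a' then 'A' else c) := by
  rw [PySem.Chars.replace]
  simp only [List.isEmpty_cons, if_neg Bool.false_ne_true]
  exact replace_go_a l.length l [] (le_refl _)

theorem lowerChar_idem (c : Char) :
    PySem.Chars.lowerChar (PySem.Chars.lowerChar c) = PySem.Chars.lowerChar c := by
  unfold PySem.Chars.lowerChar PySem.Chars.isupper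
  by_cases h1 : ((decide ('A' ≤ c) && decide (c ≤ 'Z')) = true)
  · rw [if_pos h1]
    simp only [Bool.and_eq_true, decide_eq_true_eq, Char.le_def] at h1
    obtain ⟨hA, hZ⟩ := h1
    have hA2 : 65 ≤ c.toNat := by simpa using hA
    have hZ2 : c.toNat ≤ 90 := by simpa using hZ
    have hv : (Char.ofNat (c.toNat + 32)).toNat = c.toNat + 32 := by
      rw [Char.toNat_ofNat, if_pos (Or.inl (by omega))]
    rw [if_neg]
    simp only [Bool.and_eq_true, decide_eq_true_eq, Char.le_def, not_and]
    intro _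
    simp only [UInt32.le_iff_toNat_le]
    have hvv : (Char.ofNat (c.toNat + 32)).val.toNat = c.toNat + 32 := hv
    have hz : ('Z'.val.toNat) = 90 := by decide
    omega
  · rw [if_neg h1, if_neg h1]

theorem foldl_A (l : List Char) (acc : List Char) :
    l.foldl (fun answer i =>
      let i' := PySem.Chars.lowerChar i
      if i' = 'a' then answer ++ [PySem.Chars.upperChar i'] else answer ++ [PySem.Chars.lowerChar i']) acc
    = acc ++ l.map (fun c =>
        if PySem.Chars.lowerChar c = 'a' then 'A' else PySem.Chars.lowerChar c) := by
  induction l generalizing acc with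
  | nil => simp
  | cons c t ih =>
    simp only [List.foldl_cons, List.map_cons]
    rw [ih]
    by_cases hc : PySem.Chars.lowerChar c = 'a'
    · have hu : PySem.Chars.upperChar 'a' = 'A' := by decide
      simp [hc, hu]
    · simp [hc, lowerChar_idem]

-- ===== VERDICT (by name: the statement is the Claim_ definition above) =====
theorem solution_spec : Claim_equal_solution := by
  intro s _
  unfold Spec_solution solution solution_alt
  apply String.ext  -- reduce to toList
  simp only [PySem.Str.toList_replace, PySem.Str.toList_lower]
  show _ = PySem.Chars.replace (PySem.Chars.lower s.toList) ("a".toList) ("A".toList)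
  have : ("a" : String).toList = ['a'] := rfl
  have hA : ("A" : String).toList = ['A'] := rfl
  rw [this, hA, replace_a, foldl_A]
  simp only [String.toList_ofList, List.nil_append, PySem.Chars.lower, List.map_map]
  rfl
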